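-- pv_equiv track=rewrite | github.com/tolmachina/FinalProjectCS50 | ps4b.py | isValidWordInDict
-- ===== SOURCE A (Python) =====
-- def isValidWordInDict(word, hand, wordDict):
--     """
--     Returns True if word is in the wordList and is entirely
--     composed of letters in the hand. Otherwise, returns False.
--
--     Does not mutate hand or wordList.
--
--     word: string
--     hand: dictionary (string -> int)
--     wordList: list of lowercase strings
--     hand[x] = hand.get(x, 0) + 1
--     """
--     count = 0
--     copyHand = hand.copy()
--     for i in range(len(word)):
--         if word[i] in copyHand:
--             if copyHand[word[i]] > 0:
--                 count += 1
--                 copyHand[word[i]] = copyHand.get(word[i]) - 1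
--     if (word in wordDict) and count == len(word):
--         return True
--     else:
--         return False
-- ===== SOURCE B (Python) =====
-- def isValidWordInDict(word, hand, wordDict):
--     """Same result as A: word must be in wordDict and buildable from hand.
--     Instead of copying hand and decrementing per character, compare the
--     required count of each distinct letter against what hand offers."""
--     return word in wordDict and all(word.count(c) <= hand.get(c, 0) for c in set(word))
-- ===== Notes on version B (the rewrite author's own statement) =====
-- stated objective: simpler
-- what changed: B drops A's copied hand and per-character consume-and-decrement loop; it checks buildability as an aggregate all() over the distinct letters of the word, comparing word.count(c) with hand.get(c, 0), with no mutation and no running counter.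
import Mathlib
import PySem

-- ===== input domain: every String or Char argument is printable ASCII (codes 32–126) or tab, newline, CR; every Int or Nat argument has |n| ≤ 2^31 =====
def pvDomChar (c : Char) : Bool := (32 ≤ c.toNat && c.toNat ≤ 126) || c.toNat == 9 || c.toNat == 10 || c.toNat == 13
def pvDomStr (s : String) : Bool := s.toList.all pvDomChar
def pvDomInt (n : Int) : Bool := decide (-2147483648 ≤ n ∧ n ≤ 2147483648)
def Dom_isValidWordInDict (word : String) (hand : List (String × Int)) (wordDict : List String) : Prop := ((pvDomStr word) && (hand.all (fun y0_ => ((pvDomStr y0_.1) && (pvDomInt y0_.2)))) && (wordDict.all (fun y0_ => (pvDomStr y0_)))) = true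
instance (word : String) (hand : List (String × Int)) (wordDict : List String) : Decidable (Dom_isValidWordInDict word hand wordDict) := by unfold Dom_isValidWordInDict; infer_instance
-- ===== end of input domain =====

-- B replaces A's copied hand and consume-and-decrement loop by an aggregate check over
-- the word's distinct letters (simpler; same cost). Neither mutates its arguments.

-- ===== PORT A =====
-- A's loop: for i in range(len(word)): consume word[i] from copyHand if available, counting consumptions.
def isValidWordInDict (word : String) (hand : List (String × Int)) (wordDict : List String) : Bool :=
  let st := (PySem.List.pyRange 0 (PySem.Str.len word) 1).foldl
    (fun (s : Int × PySem.Dict String Int) i =>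
      let c := String.singleton (PySem.List.pyGetD word.toList i ' ')  -- word[i], always in range here
      if s.2.contains c then
        if s.2.getD c 0 > 0 then (s.1 + 1, s.2.insert c (s.2.getD c 0 - 1)) else s
      else s)
    (0, PySem.Dict.mk hand)
  if wordDict.contains word && (st.1 == (PySem.Str.len word : Int)) then true else false

-- ===== PORT B =====
-- Source B: word in wordDict and all(word.count(c) <= hand.get(c, 0) for c in set(word))
-- (word.count(c) for a 1-character c is exactly the character count of the list of chars)
def isValidWordInDict_alt (word : String) (hand : List (String × Int)) (wordDict : List String) : Bool :=
  wordDict.contains word &&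
    (PySem.Set.ofList word.toList).all
      (fun c => decide ((word.toList.count c : Int) ≤ (PySem.Dict.mk hand).getD (String.singleton c) 0))

-- ===== PRECONDITION & SPEC =====
def Spec_isValidWordInDict (word : String) (hand : List (String × Int)) (wordDict : List String) (out : Bool) : Prop := out = isValidWordInDict_alt word hand wordDict
instance (word : String) (hand : List (String × Int)) (wordDict : List String) (out : Bool) : Decidable (Spec_isValidWordInDict word hand wordDict out) := by unfold Spec_isValidWordInDict; infer_instance

-- ===== CLAIM (what is proved, stated in full; the proofs are below) =====
def Claim_equal_isValidWordInDict : Prop := ∀ (word : String) (hand : List (String × Int)) (wordDict : List String), Dom_isValidWordInDict word hand wordDict → Spec_isValidWordInDict word hand wordDict (isValidWordInDict word hand wordDict)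

-- ===== LEMMAS AND PROOFS =====

-- A's loop body, over the characters of the word (reached via foldl_pyRange_zero_pyGetD').
def pvStepA (s : Int × PySem.Dict String Int) (ch : Char) : Int × PySem.Dict String Int :=
  if s.2.contains (String.singleton ch) then
    if s.2.getD (String.singleton ch) 0 > 0 then
      (s.1 + 1, s.2.insert (String.singleton ch) (s.2.getD (String.singleton ch) 0 - 1))
    else s
  else s

theorem pvSingleton_inj {a b : Char} (h : String.singleton a = String.singleton b) : a = b := by
  have := congrArg String.toList h
  simpa using this

theorem pvStepA_pos (count : Int) (d : PySem.Dict String Int) (ch : Char)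
    (hc : d.contains (String.singleton ch) = true) (hpos : d.getD (String.singleton ch) 0 > 0) :
    pvStepA (count, d) ch = (count + 1, d.insert (String.singleton ch) (d.getD (String.singleton ch) 0 - 1)) := by
  unfold pvStepA
  rw [if_pos hc, if_pos hpos]

theorem pvStepA_stay (count : Int) (d : PySem.Dict String Int) (ch : Char)
    (h : ¬ d.getD (String.singleton ch) 0 > 0) :
    pvStepA (count, d) ch = (count, d) := by
  simp [pvStepA, h]

theorem pvContains_of_pos (d : PySem.Dict String Int) (k : String)
    (hpos : d.getD k 0 > 0) : d.contains k = true := by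
  by_cases h : d.contains k = true
  · exact h
  · exfalso
    have h' : d.contains k = false := by simpa using h
    have h0 := PySem.Dict.getD_of_not_contains (d := d) (k := k) (d0 := (0 : Int)) h'
    omega

theorem pvLoop_le (cs : List Char) (count : Int) (d : PySem.Dict String Int) :
    (cs.foldl pvStepA (count, d)).1 ≤ count + cs.length := by
  induction cs generalizing count d with
  | nil => simp
  | cons c rest ih =>
    rw [List.foldl_cons, List.length_cons]
    by_cases hpos : d.getD (String.singleton c) 0 > 0
    · rw [pvStepA_pos count d c (pvContains_of_pos d _ hpos) hpos]
      have := ih (count + 1) (d.insert (String.singleton c) (d.getD (String.singleton c) 0 - 1))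
      push_cast at this ⊢; omega
    · rw [pvStepA_stay count d c hpos]
      have := ih count d
      push_cast at this ⊢; omega

theorem pvLoop_full_iff (cs : List Char) (count : Int) (d : PySem.Dict String Int) :
    (cs.foldl pvStepA (count, d)).1 = count + cs.length ↔
      ∀ c ∈ cs, (cs.count c : Int) ≤ d.getD (String.singleton c) 0 := by
  induction cs generalizing count d with
  | nil => simp
  | cons c rest ih =>
    rw [List.foldl_cons, List.length_cons]
    by_cases hpos : d.getD (String.singleton c) 0 > 0
    · rw [pvStepA_pos count d c (pvContains_of_pos d _ hpos) hpos,
        show (count : Int) + ((rest.length + 1 : Nat) : Int) = (count + 1) + rest.length by push_cast; ring,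
        ih]
      constructor
      · intro h x hx
        rcases eq_or_ne x c with rfl | hne
        · by_cases hxr : x ∈ rest
          · have := h x hxr
            rw [PySem.Dict.getD_insert, if_pos rfl] at this
            rw [List.count_cons_self]
            push_cast at this ⊢; omega
          · rw [List.count_cons_self, List.count_eq_zero_of_not_mem hxr]
            push_cast; omega
        · have hxr : x ∈ rest := (List.mem_cons.mp hx).resolve_left hne
          have := h x hxr
          rw [PySem.Dict.getD_insert, if_neg (fun e => hne (pvSingleton_inj e))] at this
          rw [List.count_cons_of_ne (Ne.symm hne)]
          exact this
      · intro h x hxr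
        rw [PySem.Dict.getD_insert]
        rcases eq_or_ne x c with rfl | hne
        · rw [if_pos rfl]
          have := h x List.mem_cons_self
          rw [List.count_cons_self] at this
          push_cast at this ⊢; omega
        · rw [if_neg (fun e => hne (pvSingleton_inj e))]
          have := h x (List.mem_cons_of_mem c hxr)
          rw [List.count_cons_of_ne (Ne.symm hne)] at this
          exact this
    · -- the first character cannot be consumed: the loop stays put and the aggregate check fails at c
      rw [pvStepA_stay count d c hpos]
      have hle := pvLoop_le rest count d
      constructor
      · intro h; exfalso; push_cast at h hle; omega
      · intro h; exfalso
        have := h c List.mem_cons_self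
        rw [List.count_cons_self] at this
        have hcnt : (0 : Int) ≤ rest.count c := by positivity
        push_cast at this; omega

-- ===== VERDICT (by name: the statement is the Claim_ definition above) =====
theorem isValidWordInDict_spec : Claim_equal_isValidWordInDict := by
  intro word hand wordDict _
  unfold Spec_isValidWordInDict isValidWordInDict isValidWordInDict_alt
  rw [show (fun (s : Int × PySem.Dict String Int) (i : Int) =>
        let c := String.singleton (PySem.List.pyGetD word.toList i ' ')
        if s.2.contains c then
          if s.2.getD c 0 > 0 then (s.1 + 1, s.2.insert c (s.2.getD c 0 - 1)) else s
        else s) = (fun s i => pvStepA s (PySem.List.pyGetD word.toList i ' ')) from rfl]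
  have hlen : PySem.Str.len word = (word.toList.length : Int) := by simp [PySem.Str.len_eq]
  rw [hlen, PySem.List.foldl_pyRange_zero_pyGetD' word.toList ' ' pvStepA (0, PySem.Dict.mk hand)]
  have hfull := pvLoop_full_iff word.toList 0 (PySem.Dict.mk hand)
  rw [zero_add] at hfull
  cases hmem : wordDict.contains word with
  | false =>
    rw [if_neg (by simp), Bool.false_and]
  | true =>
    simp only [Bool.true_and]
    by_cases hcnt : (word.toList.foldl pvStepA (0, PySem.Dict.mk hand)).1 = (word.toList.length : Int)
    · rw [if_pos (by simp only [beq_iff_eq]; exact hcnt)]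
      have hall := hfull.mp hcnt
      symm
      simp only [List.all_eq_true, decide_eq_true_eq]
      intro c hc
      exact hall c ((PySem.Set.mem_ofList word.toList c).mp hc)
    · rw [if_neg (by simp only [beq_iff_eq]; exact hcnt)]
      cases hAll : (PySem.Set.ofList word.toList).all
          (fun c => decide ((word.toList.count c : Int) ≤ (PySem.Dict.mk hand).getD (String.singleton c) 0)) with
      | false => rfl
      | true =>
        exfalso
        apply hcnt
        apply hfull.mpr
        intro c hc
        have := List.all_eq_true.mp hAll c ((PySem.Set.mem_ofList word.toList c).mpr hc)
        simpa using this
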